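-- pv_equiv track=rewrite | github.com/JIMENA-eng/MetodosDEoptimizacion | 2UNI_CODE_CARAMELO/CARAMELO_6.PY | asignar_supervivientes_a_jugadores
-- ===== SOURCE A (Python) =====
-- from collections import Counter
--
-- def asignar_supervivientes_a_jugadores(jugadores, total_supervivientes):
--     """Asigna supervivientes a jugadores basado en sus dulces iniciales"""
--     # Calcular puntaje de cada jugador (más variedad = mejor oportunidad)
--     puntajes = {}
--     for jugador, dulces in jugadores.items():
--         variedad = len(set(dulces))
--         contador = Counter(dulces)
--         balance = min(contador.values())
--         puntajes[jugador] = variedad * 10 + balance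
--
--     # Ordenar por puntaje descendente
--     jugadores_ordenados = sorted(puntajes.items(), key=lambda x: x[1], reverse=True)
--
--     # Asignar supervivientes
--     supervivientes = []
--     for i in range(min(total_supervivientes, len(jugadores_ordenados))):
--         supervivientes.append(jugadores_ordenados[i][0])
--
--     return supervivientes
-- ===== SOURCE B (Python) =====
-- from collections import Counter
--
-- def asignar_supervivientes_a_jugadores(jugadores, total_supervivientes):
--     """Asigna supervivientes a jugadores basado en sus dulces iniciales"""
--     # Score each player, then pick the top-k by repeated stable extraction of
--     # the first maximum (selection), instead of fully sorting and slicing.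
--     restantes = [(j, len(set(d)) * 10 + min(Counter(d).values()))
--                  for j, d in jugadores.items()]
--     supervivientes = []
--     for _ in range(min(total_supervivientes, len(restantes))):
--         mejor = 0
--         for i in range(1, len(restantes)):
--             if restantes[i][1] > restantes[mejor][1]:
--                 mejor = i
--         supervivientes.append(restantes.pop(mejor)[0])
--     return supervivientes
-- ===== Notes on version B (the rewrite author's own statement) =====
-- stated objective: alternative
-- what changed: B drops A's score dict and full stable reverse sort: it scores the players into a list and then selects the top-k by k rounds of scanning the remaining players for the first maximal score and popping it, so no sorted order is ever built.
import Mathlib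
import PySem

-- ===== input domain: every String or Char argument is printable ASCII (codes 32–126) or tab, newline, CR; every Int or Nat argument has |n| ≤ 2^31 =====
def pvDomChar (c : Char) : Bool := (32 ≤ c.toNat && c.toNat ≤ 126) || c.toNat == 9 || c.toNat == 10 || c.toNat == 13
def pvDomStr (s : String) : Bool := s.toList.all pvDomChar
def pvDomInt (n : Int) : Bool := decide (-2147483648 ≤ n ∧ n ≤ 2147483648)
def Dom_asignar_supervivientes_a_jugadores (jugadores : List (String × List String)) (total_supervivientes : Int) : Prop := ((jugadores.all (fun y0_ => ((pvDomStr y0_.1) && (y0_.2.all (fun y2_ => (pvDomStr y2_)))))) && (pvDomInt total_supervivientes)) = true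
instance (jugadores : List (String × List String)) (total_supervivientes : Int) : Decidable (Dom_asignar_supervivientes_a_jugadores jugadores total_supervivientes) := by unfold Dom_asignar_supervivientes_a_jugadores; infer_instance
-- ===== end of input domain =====

-- B replaces A's score-dict + full stable reverse sort + slice by top-k selection:
-- k rounds, each scanning the remaining scored players for the first maximum and
-- popping it (objective: alternative; return value only — neither mutates its input).
-- Both programs read `jugadores` as a Python dict: the association list is taken in
-- dict order (first position, last value for a repeated key), via PySem.Dict.ofList.

-- ===== PORT A =====
def asignar_supervivientes_a_jugadores (jugadores : List (String × List String)) (total_supervivientes : Int) : List String :=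
  let items := (PySem.Dict.ofList jugadores).items
  -- puntajes = {}; for jugador, dulces in jugadores.items(): ...
  let puntajes : PySem.Dict String Int :=
    items.foldl (fun d pr =>
      let variedad : Nat := (PySem.Set.ofList pr.2).length
      let contador := PySem.Dict.counter pr.2
      -- min(contador.values()): total form via getD 0, ValueError (empty dulces) excluded by Pre_
      let balance : Int := ((PySem.List.min? contador.values (fun v => v)).getD 0)
      d.insert pr.1 ((variedad : Int) * 10 + balance)) PySem.Dict.empty
  -- jugadores_ordenados = sorted(puntajes.items(), key=lambda x: x[1], reverse=True)
  let jugadores_ordenados := PySem.List.sorted puntajes.items (fun x => x.2) true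
  -- for i in range(min(total_supervivientes, len(jugadores_ordenados))): append jo[i][0]
  (PySem.List.pyRange 0 (min total_supervivientes (jugadores_ordenados.length : Int)) 1).foldl
    (fun acc i => acc ++ [(PySem.List.pyGetD jugadores_ordenados i ("", 0)).1]) []

-- ===== PORT B =====
def asignar_supervivientes_a_jugadores_alt (jugadores : List (String × List String)) (total_supervivientes : Int) : List String :=
  -- restantes = [(j, len(set(d))*10 + min(Counter(d).values())) for j, d in jugadores.items()]
  -- (min() on an empty candy list raises ValueError: total form via getD 0, excluded by Pre_)
  let restantes : List (String × Int) :=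
    (PySem.Dict.ofList jugadores).items.map (fun pr =>
      (pr.1, ((PySem.Set.ofList pr.2).length : Int) * 10
        + ((PySem.List.min? (PySem.Dict.counter pr.2).values (fun v => v)).getD 0)))
  -- for _ in range(min(total_supervivientes, len(restantes))): select first max, pop it
  let st :=
    (PySem.List.pyRange 0 (min total_supervivientes (restantes.length : Int)) 1).foldl
      (fun (st : List (String × Int) × List String) _ =>
        let r := st.1
        -- mejor = 0; for i in range(1, len(restantes)): if restantes[i][1] > restantes[mejor][1]: mejor = i
        let mejor : Int := (PySem.List.pyRange 1 (r.length : Int) 1).foldl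
          (fun m i => if (PySem.List.pyGetD r i ("", 0)).2 > (PySem.List.pyGetD r m ("", 0)).2 then i else m) 0
        -- supervivientes.append(restantes.pop(mejor)[0]) — pop? is a totality guard (mejor is always in range here)
        match PySem.List.pop? r mejor with
        | some xr => (xr.2, st.2 ++ [xr.1.1])
        | none => st)
      (restantes, [])
  st.2

-- ===== PRECONDITION & SPEC =====
-- Pre_ excludes exactly the inputs where some player's candy list (as seen by the dict) is
-- empty: there Python's min() raises ValueError in A (and in B alike).
def Pre_asignar_supervivientes_a_jugadores (jugadores : List (String × List String)) (total_supervivientes : Int) : Prop :=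
  ∀ p ∈ (PySem.Dict.ofList jugadores).items, p.2 ≠ []
instance (jugadores : List (String × List String)) (total_supervivientes : Int) : Decidable (Pre_asignar_supervivientes_a_jugadores jugadores total_supervivientes) := by unfold Pre_asignar_supervivientes_a_jugadores; infer_instance
def pvWitness_asignar_supervivientes_a_jugadores : (List (String × List String)) × Int :=
  ([("ana", ["a", "b", "a"]), ("bob", ["c"])], 1)
def Spec_asignar_supervivientes_a_jugadores (jugadores : List (String × List String)) (total_supervivientes : Int) (out : List String) : Prop := out = asignar_supervivientes_a_jugadores_alt jugadores total_supervivientes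
instance (jugadores : List (String × List String)) (total_supervivientes : Int) (out : List String) : Decidable (Spec_asignar_supervivientes_a_jugadores jugadores total_supervivientes out) := by unfold Spec_asignar_supervivientes_a_jugadores; infer_instance

-- ===== CLAIM (what is proved, stated in full; the proofs are below) =====
def Claim_equal_asignar_supervivientes_a_jugadores : Prop := ∀ (jugadores : List (String × List String)) (total_supervivientes : Int), Dom_asignar_supervivientes_a_jugadores jugadores total_supervivientes → Pre_asignar_supervivientes_a_jugadores jugadores total_supervivientes → Spec_asignar_supervivientes_a_jugadores jugadores total_supervivientes (asignar_supervivientes_a_jugadores jugadores total_supervivientes)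

-- ===== LEMMAS AND PROOFS =====

-- the score key of position i (total form used throughout the selection lemmas)
def pvKey (r : List (String × Int)) (i : Nat) : Int := (r.getD i ("", 0)).2

-- index of the FIRST maximal-key element (0 on [])
def pvAm : List (String × Int) → Nat
  | [] => 0
  | [_] => 0
  | x :: y :: t => if x.2 < pvKey (y :: t) (pvAm (y :: t)) then pvAm (y :: t) + 1 else 0

theorem pvKey_cons_succ (x : String × Int) (t : List (String × Int)) (i : Nat) :
    pvKey (x :: t) (i + 1) = pvKey t i := by simp [pvKey]

theorem pvKey_cons_zero (x : String × Int) (t : List (String × Int)) :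
    pvKey (x :: t) 0 = x.2 := by simp [pvKey]

theorem pvAm_lt : ∀ r : List (String × Int), r ≠ [] → pvAm r < r.length := by
  intro r
  induction r with
  | nil => intro h; exact absurd rfl h
  | cons x t ih =>
    intro _
    cases t with
    | nil => simp [pvAm]
    | cons y t' =>
      have := ih (by simp)
      simp only [List.length_cons] at this
      by_cases h : x.2 < pvKey (y :: t') (pvAm (y :: t'))
      · simp only [pvAm, if_pos h, List.length_cons]; omega
      · simp only [pvAm, if_neg h, List.length_cons]; omega

theorem pvAm_max : ∀ (r : List (String × Int)) (i : Nat), i < r.length → pvKey r i ≤ pvKey r (pvAm r) := by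
  intro r
  induction r with
  | nil => intro i hi; simp at hi
  | cons x t ih =>
    intro i hi
    cases t with
    | nil =>
      have h0 : i = 0 := by simp at hi; omega
      subst h0; simp [pvAm]
    | cons y t' =>
      by_cases h : x.2 < pvKey (y :: t') (pvAm (y :: t'))
      · simp only [pvAm, if_pos h]
        rw [pvKey_cons_succ]
        cases i with
        | zero => rw [pvKey_cons_zero]; omega
        | succ j =>
          rw [pvKey_cons_succ]
          exact ih j (by simpa using hi)
      · simp only [pvAm, if_neg h]
        rw [pvKey_cons_zero]
        cases i with
        | zero => rw [pvKey_cons_zero]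
        | succ j =>
          rw [pvKey_cons_succ]
          have h1 := ih j (by simpa using hi)
          omega

theorem pvAm_first : ∀ (r : List (String × Int)) (i : Nat), i < pvAm r → pvKey r i < pvKey r (pvAm r) := by
  intro r
  induction r with
  | nil => intro i hi; simp [pvAm] at hi
  | cons x t ih =>
    intro i hi
    cases t with
    | nil => simp [pvAm] at hi
    | cons y t' =>
      by_cases h : x.2 < pvKey (y :: t') (pvAm (y :: t'))
      · simp only [pvAm, if_pos h] at hi ⊢
        rw [pvKey_cons_succ]
        cases i with
        | zero => rw [pvKey_cons_zero]; exact h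
        | succ j =>
          rw [pvKey_cons_succ]
          exact ih j (by omega)
      · simp only [pvAm, if_neg h] at hi
        omega

theorem pvAm_unique (r : List (String × Int)) (m : Nat) (hm : m < r.length)
    (hmax : ∀ i < r.length, pvKey r i ≤ pvKey r m)
    (hfirst : ∀ i < m, pvKey r i < pvKey r m) : m = pvAm r := by
  have hne : r ≠ [] := by intro h; subst h; simp at hm
  have ham := pvAm_lt r hne
  rcases lt_trichotomy m (pvAm r) with h | h | h
  · have h1 := pvAm_first r m h
    have h2 := hmax (pvAm r) ham
    omega
  · exact h
  · have h1 := hfirst (pvAm r) h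
    have h2 := pvAm_max r m hm
    omega

-- selection sort by descending key, extracting the first maximum each round
def selSort (r : List (String × Int)) : List (String × Int) :=
  if h : r = [] then []
  else r.getD (pvAm r) ("", 0) :: selSort (r.eraseIdx (pvAm r))
  termination_by r.length
  decreasing_by
    have h1 := pvAm_lt r h
    rw [List.length_eraseIdx, if_pos h1]
    omega

theorem selSort_nil : selSort [] = [] := by rw [selSort]; rfl

theorem selSort_cons (r : List (String × Int)) (h : r ≠ []) :
    selSort r = r.getD (pvAm r) ("", 0) :: selSort (r.eraseIdx (pvAm r)) := by
  rw [selSort, dif_neg h]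

theorem mem_selSort : ∀ (r : List (String × Int)) (y : String × Int), y ∈ selSort r → y ∈ r := by
  intro r
  induction hn : r.length using Nat.strong_induction_on generalizing r with
  | _ n ih =>
    intro y hy
    by_cases h : r = []
    · subst h; rw [selSort_nil] at hy; simp at hy
    · rw [selSort_cons r h] at hy
      have hlt := pvAm_lt r h
      cases List.mem_cons.mp hy with
      | inl he =>
        subst he
        rw [List.getD_eq_getElem _ _ hlt]
        exact List.getElem_mem _
      | inr ht =>
        have hl : (r.eraseIdx (pvAm r)).length < n := by
          rw [List.length_eraseIdx, if_pos hlt]; omega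
        exact List.mem_of_mem_eraseIdx (ih _ (by omega) _ rfl y ht)

-- key of a member is at most the key at the first-max index
theorem key_le_pvAm (r : List (String × Int)) (y : String × Int) (hy : y ∈ r) :
    y.2 ≤ pvKey r (pvAm r) := by
  obtain ⟨i, hi, he⟩ := List.mem_iff_getElem.mp hy
  have := pvAm_max r i hi
  rw [pvKey, List.getD_eq_getElem _ _ hi, he] at this
  exact this

-- insertBy puts x in front of a list it goes before everywhere
theorem pv_insertBy_front {α : Type} (before : α → α → Bool) (x : α) (zs : List α)
    (h : ∀ y ∈ zs, before x y = true) :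
    PySem.List.insertBy before x zs = x :: zs := by
  cases zs with
  | nil => rfl
  | cons z t =>
    have hz : before x z = true := h z (by simp)
    simp [PySem.List.insertBy, hz]

-- inserting a new last element into the selection sort = selection sort of the longer list
theorem pv_insertBy_selSort : ∀ (r : List (String × Int)) (x : String × Int),
    PySem.List.insertBy (fun a b => decide (b.2 < a.2)) x (selSort r) = selSort (r ++ [x]) := by
  intro r
  induction hn : r.length using Nat.strong_induction_on generalizing r with
  | _ n ih =>
    intro x
    by_cases h : r = []
    · subst h
      simp only [List.nil_append]
      rw [selSort_cons [x] (by simp)]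
      simp [PySem.List.insertBy, pvAm, selSort_nil]
    · have hlt := pvAm_lt r h
      by_cases hx : pvKey r (pvAm r) < x.2
      · -- x strictly beats every score in r: it becomes the new (unique-position) first max, at the end
        have hm : r.length = pvAm (r ++ [x]) := by
          apply pvAm_unique
          · simp
          · intro i hi
            rw [List.length_append, List.length_singleton] at hi
            have hxk : pvKey (r ++ [x]) r.length = x.2 := by
              rw [pvKey, List.getD_eq_getElem _ _ (by simp)]
              simp
            rcases Nat.lt_or_ge i r.length with hi' | hi'
            · rw [hxk, pvKey, List.getD_append _ _ _ _ hi', ← pvKey]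
              have h1 : pvKey r i ≤ pvKey r (pvAm r) := pvAm_max r i hi'
              omega
            · have : i = r.length := by omega
              subst this
              rw [hxk]
          · intro i hi
            have hxk : pvKey (r ++ [x]) r.length = x.2 := by
              rw [pvKey, List.getD_eq_getElem _ _ (by simp)]
              simp
            rw [hxk, pvKey, List.getD_append _ _ _ _ hi, ← pvKey]
            have h1 : pvKey r i ≤ pvKey r (pvAm r) := pvAm_max r i hi
            omega
        rw [selSort_cons (r ++ [x]) (by simp), ← hm]
        have he : (r ++ [x]).eraseIdx r.length = r := by
          rw [List.eraseIdx_append_of_length_le (le_refl _)]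
          simp
        have hg : (r ++ [x]).getD r.length ("", 0) = x := by
          rw [List.getD_eq_getElem _ _ (by simp)]
          simp
        rw [he, hg]
        apply pv_insertBy_front
        intro y hy
        have h1 := key_le_pvAm r y (mem_selSort r y hy)
        simp only [decide_eq_true_eq]
        exact lt_of_le_of_lt h1 hx
      · -- x does not beat the current first max: the first max is unchanged
        have hm : pvAm r = pvAm (r ++ [x]) := by
          apply pvAm_unique
          · rw [List.length_append]; omega
          · intro i hi
            rw [List.length_append, List.length_singleton] at hi
            have hak : pvKey (r ++ [x]) (pvAm r) = pvKey r (pvAm r) := by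
              rw [pvKey, List.getD_append _ _ _ _ hlt, ← pvKey]
            rcases Nat.lt_or_ge i r.length with hi' | hi'
            · rw [hak, pvKey, List.getD_append _ _ _ _ hi', ← pvKey]
              exact pvAm_max r i hi'
            · have : i = r.length := by omega
              subst this
              have hxk : pvKey (r ++ [x]) r.length = x.2 := by
                rw [pvKey, List.getD_eq_getElem _ _ (by simp)]
                simp
              rw [hak, hxk]; omega
          · intro i hi
            have hak : pvKey (r ++ [x]) (pvAm r) = pvKey r (pvAm r) := by
              rw [pvKey, List.getD_append _ _ _ _ hlt, ← pvKey]
            rw [hak, pvKey, List.getD_append _ _ _ _ (by omega), ← pvKey]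
            exact pvAm_first r i hi
        rw [selSort_cons r h, selSort_cons (r ++ [x]) (by simp), ← hm]
        have he : (r ++ [x]).eraseIdx (pvAm r) = r.eraseIdx (pvAm r) ++ [x] := by
          exact List.eraseIdx_append_of_lt_length hlt [x]
        have hg : (r ++ [x]).getD (pvAm r) ("", 0) = r.getD (pvAm r) ("", 0) := by
          exact List.getD_append _ _ _ _ hlt
        rw [he, hg]
        have hbef : (decide ((r.getD (pvAm r) ("", 0)).2 < x.2) : Bool) = false := by
          have hx' : ¬ (r.getD (pvAm r) ("", 0)).2 < x.2 := hx
          simp only [decide_eq_false_iff_not]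
          exact hx'
        simp only [PySem.List.insertBy, hbef]
        simp only [Bool.false_eq_true, if_false]
        congr 1
        have hl : (r.eraseIdx (pvAm r)).length < n := by
          rw [List.length_eraseIdx, if_pos hlt]; omega
        exact ih _ (by omega) _ rfl x

-- the stable descending sort IS selection of the first maximum, round by round
theorem pv_sorted_rev_eq_selSort (l : List (String × Int)) :
    PySem.List.sorted l (fun x => x.2) true = selSort l := by
  rw [PySem.List.sorted_rev_eq_foldl_insertBy]
  induction l using List.reverseRecOn with
  | nil => rw [selSort_nil]; rfl
  | append_singleton l' x ih =>
    rw [List.foldl_append, List.foldl_cons, List.foldl_nil, ih, pv_insertBy_selSort]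

-- B's inner scan computes the first-max index pvAm
theorem pv_fold_argmax (r : List (String × Int)) : ∀ (n : Nat), 1 ≤ n → n ≤ r.length →
    ∃ m : Nat,
      (PySem.List.pyRange 1 (n : Int) 1).foldl
        (fun m i => if (PySem.List.pyGetD r i ("", 0)).2 > (PySem.List.pyGetD r m ("", 0)).2 then i else m) 0
        = (m : Int)
      ∧ m < n ∧ (∀ i < n, pvKey r i ≤ pvKey r m) ∧ (∀ i < m, pvKey r i < pvKey r m) := by
  intro n
  induction n with
  | zero => intro h; omega
  | succ n ihn =>
    intro _ hle
    by_cases hn : 1 ≤ n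
    · obtain ⟨m, hfold, hmn, hmax, hfirst⟩ := ihn hn (by omega)
      have hrange : PySem.List.pyRange 1 ((n + 1 : Nat) : Int) 1 = PySem.List.pyRange 1 (n : Int) 1 ++ [(n : Int)] := by
        rw [show ((n + 1 : Nat) : Int) = (n : Int) + 1 by push_cast; ring]
        exact PySem.List.pyRange_one_succ_right (by exact_mod_cast hn)
      rw [hrange, List.foldl_append, hfold, List.foldl_cons, List.foldl_nil,
          PySem.List.pyGetD_natCast, PySem.List.pyGetD_natCast]
      by_cases hc : (r.getD n ("", 0)).2 > (r.getD m ("", 0)).2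
      · rw [if_pos hc]
        have hc' : pvKey r m < pvKey r n := hc
        refine ⟨n, rfl, by omega, ?_, ?_⟩
        · intro i hi
          rcases Nat.lt_or_ge i n with hi' | hi'
          · have := hmax i hi'
            omega
          · have : i = n := by omega
            subst this; exact le_refl _
        · intro i hi
          have := hmax i hi
          omega
      · rw [if_neg hc]
        have hc' : ¬ pvKey r m < pvKey r n := hc
        refine ⟨m, rfl, by omega, ?_, hfirst⟩
        intro i hi
        rcases Nat.lt_or_ge i n with hi' | hi'
        · exact hmax i hi'
        · have hin : i = n := by omega
          subst hin
          omega
    · have h0 : n = 0 := by omega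
      subst h0
      refine ⟨0, ?_, by omega, ?_, by omega⟩
      · rw [show ((0 + 1 : Nat) : Int) = 1 by norm_num, PySem.List.pyRange_one_eq_nil (le_refl _)]
        rfl
      · intro i hi
        have : i = 0 := by omega
        subst this; exact le_refl _

-- B's outer loop collects the first |is| names of selSort
theorem pv_loop_take : ∀ (is : List Int) (r : List (String × Int)) (acc : List String),
    is.length ≤ r.length →
    ((is.foldl (fun (st : List (String × Int) × List String) _ =>
        let r := st.1
        let mejor : Int := (PySem.List.pyRange 1 (r.length : Int) 1).foldl
          (fun m i => if (PySem.List.pyGetD r i ("", 0)).2 > (PySem.List.pyGetD r m ("", 0)).2 then i else m) 0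
        match PySem.List.pop? r mejor with
        | some xr => (xr.2, st.2 ++ [xr.1.1])
        | none => st) (r, acc)).2)
      = acc ++ ((selSort r).take is.length).map (fun p => p.1) := by
  intro is
  induction is with
  | nil => intro r acc _; simp
  | cons i0 is' ih =>
    intro r acc hle
    rw [List.length_cons] at hle
    have hne : r ≠ [] := by
      intro h; subst h; simp at hle
    have h1 : 1 ≤ r.length := by
      cases r with
      | nil => exact absurd rfl hne
      | cons _ _ => simp
    obtain ⟨m, hfold, hmn, hmax, hfirst⟩ := pv_fold_argmax r r.length h1 (le_refl _)
    have hmam : m = pvAm r := pvAm_unique r m hmn hmax hfirst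
    rw [List.foldl_cons]
    simp only [hfold, PySem.List.pop?_natCast r m hmn]
    have herase : (r.eraseIdx m).length = r.length - 1 := by
      rw [List.length_eraseIdx, if_pos hmn]
    rw [ih _ _ (by omega)]
    rw [selSort_cons r hne, ← hmam, List.length_cons, List.take_succ_cons, List.map_cons,
        List.getD_eq_getElem _ _ hmn]
    simp

-- A's index loop over range(m) collects the first m elements
theorem pv_foldl_range_take {α β : Type} (xs : List α) (d : α) (f : α → β) (m : Int) (hm : m ≤ (xs.length : Int)) :
    (PySem.List.pyRange 0 m 1).foldl (fun acc i => acc ++ [f (PySem.List.pyGetD xs i d)]) []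
      = (xs.take m.toNat).map f := by
  by_cases h : m ≤ 0
  · have : PySem.List.pyRange 0 m 1 = [] := by
      simp [PySem.List.pyRange]; omega
    simp [this, Int.toNat_of_nonpos h]
  · rw [not_le] at h
    have hlen : m.toNat ≤ xs.length := by omega
    suffices H : ∀ (n a : Nat) (acc : List β), a + n ≤ xs.length →
        (PySem.List.pyRange (a : Int) ((a + n : Nat) : Int) 1).foldl
          (fun acc i => acc ++ [f (PySem.List.pyGetD xs i d)]) acc
          = acc ++ ((xs.drop a).take n).map f by
      have := H m.toNat 0 [] (by omega)
      rw [show (((0 : Nat) + m.toNat : Nat) : Int) = m by omega] at this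
      simpa using this
    intro n
    induction n with
    | zero =>
      intro a acc _
      have : PySem.List.pyRange (a : Int) ((a + 0 : Nat) : Int) 1 = [] := by
        simp [PySem.List.pyRange]
      rw [this]
      simp
    | succ n ihn =>
      intro a acc hle
      have hlt : (a : Int) < ((a + (n + 1) : Nat) : Int) := by push_cast; omega
      rw [PySem.List.pyRange_one_cons hlt, List.foldl_cons]
      have : ((a : Int) + 1) = ((a + 1 : Nat) : Int) := by push_cast; ring
      rw [this, show ((a + (n + 1) : Nat) : Int) = (((a + 1) + n : Nat) : Int) by push_cast; ring]
      rw [ihn (a + 1) _ (by omega)]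
      rw [PySem.List.pyGetD_natCast]
      have hax : a < xs.length := by omega
      rw [List.getD_eq_getElem _ _ hax]
      have hdrop : xs.drop a = xs[a] :: xs.drop (a + 1) := List.drop_eq_getElem_cons hax
      rw [hdrop, List.take_succ_cons]
      simp

-- the main equality
theorem pv_main (jugadores : List (String × List String)) (total_supervivientes : Int) :
    asignar_supervivientes_a_jugadores jugadores total_supervivientes
      = asignar_supervivientes_a_jugadores_alt jugadores total_supervivientes := by
  unfold asignar_supervivientes_a_jugadores asignar_supervivientes_a_jugadores_alt
  simp only []
  set items := (PySem.Dict.ofList jugadores).items with hitems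
  set score : List String → Int := fun dl =>
    ((PySem.Set.ofList dl).length : Int) * 10
      + ((PySem.List.min? (PySem.Dict.counter dl).values (fun v => v)).getD 0) with hscore
  have hnd : (items.map (fun p => p.1)).Nodup := PySem.Dict.nodup_keys_ofList jugadores
  set l : List (String × Int) := items.map (fun pr => (pr.1, score pr.2)) with hl
  -- A's puntajes.items is the scored pair list l
  have hA_items :
      (items.foldl (fun d pr => d.insert pr.1
          (((PySem.Set.ofList pr.2).length : Int) * 10
            + ((PySem.List.min? (PySem.Dict.counter pr.2).values (fun v => v)).getD 0)))
        (PySem.Dict.empty : PySem.Dict String Int)).items = l := by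
    rw [PySem.Dict.items_foldl_insert_fresh items (fun pr => pr.1) (fun pr => score pr.2)
        PySem.Dict.empty (by intro a _; rfl) hnd]
    simp [hl, PySem.Dict.empty]
  rw [hA_items]
  -- lengths agree
  have hsl : (PySem.List.sorted l (fun x => x.2) true).length = l.length :=
    (PySem.List.sorted_perm l (fun x => x.2) true).length_eq
  set M := min total_supervivientes (l.length : Int) with hM
  rw [hsl]
  -- A's side: take M of names of sorted list
  have hAres := pv_foldl_range_take (PySem.List.sorted l (fun x => x.2) true) ("", 0)
      (fun p => p.1) M (by rw [hM, hsl]; exact min_le_right _ _)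
  rw [hAres]
  -- B's side
  by_cases hM0 : M ≤ 0
  · rw [PySem.List.pyRange_one_eq_nil hM0, Int.toNat_of_nonpos hM0]
    simp
  · rw [not_le] at hM0
    have hMlen : M ≤ (l.length : Int) := min_le_right _ _
    have hrl : (PySem.List.pyRange 0 M 1).length = M.toNat := by
      rw [PySem.List.length_pyRange_one]; omega
    rw [pv_loop_take (PySem.List.pyRange 0 M 1) l [] (by rw [hrl]; omega), hrl,
        pv_sorted_rev_eq_selSort]
    simp [List.map_take]

-- ===== VERDICT (by name: the statement is the Claim_ definition above) =====
theorem asignar_supervivientes_a_jugadores_spec : Claim_equal_asignar_supervivientes_a_jugadores := by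
  intro jugadores total_supervivientes _ _
  exact pv_main jugadores total_supervivientes
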